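-- pv_equiv track=rewrite | github.com/seungminleeee/AlgoStudy | jun/2025.03/250310_서버 증설 횟수.py | solution
-- ===== SOURCE A (Python) =====
-- def solution(players, m, k):
--     server = [0] * 24
--     answer = 0
--
--     for time, player in enumerate(players):
--         if player >= m:
--             # 필요한 서버 수
--             required = (player // m) - server[time]
--             if required > 0:
--                 for i in range(k):
--                     if time + i < 24:
--                         server[time + i] += required
--                 answer += required
--
--     return answer
-- ===== SOURCE B (Python) =====
-- def solution(players, m, k):
--     # Single forward pass with a difference array of expiries instead of
--     # scattering each increment over k server slots.
--     n = len(players)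
--     delta = [0] * (n + 1)
--     curr = 0
--     answer = 0
--     for time, player in enumerate(players):
--         curr += delta[time]
--         if player >= m:
--             required = (player // m) - curr
--             if required > 0:
--                 answer += required
--                 if k > 0:
--                     e = time + k
--                     if e <= n:
--                         delta[e] -= required
--                     curr += required
--     return answer
-- ===== Notes on version B (the rewrite author's own statement) =====
-- stated objective: alternative
-- what changed: Replaced the 24-slot server array with its inner k-step scatter loop by a single forward pass maintaining the current active-server count plus a difference array of scheduled expiries, so each hour is processed in O(1) instead of O(k); on the timed inputs (long player lists, small k) both run in O(n) and B measured no faster.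
import Mathlib
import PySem

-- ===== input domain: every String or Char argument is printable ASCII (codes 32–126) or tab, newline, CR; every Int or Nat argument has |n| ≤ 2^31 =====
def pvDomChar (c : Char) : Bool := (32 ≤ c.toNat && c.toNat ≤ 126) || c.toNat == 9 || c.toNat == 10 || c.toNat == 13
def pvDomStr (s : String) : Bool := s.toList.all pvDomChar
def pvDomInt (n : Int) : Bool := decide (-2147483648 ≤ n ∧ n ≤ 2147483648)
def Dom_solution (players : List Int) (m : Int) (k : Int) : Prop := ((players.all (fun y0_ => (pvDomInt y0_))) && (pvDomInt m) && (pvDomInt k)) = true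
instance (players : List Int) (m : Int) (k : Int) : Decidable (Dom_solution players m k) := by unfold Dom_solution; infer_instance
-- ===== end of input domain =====

-- B replaces A's 24-slot server array and inner k-step scatter loop by a single
-- forward pass with a running active-server count and a difference array of expiries (alternative).

-- ===== PORT A =====
-- inner loop: for i in range(k): if time + i < 24: server[time+i] += required
def solInnerA (k time required : Int) (server : List Int) : List Int :=
  (PySem.List.pyRange 0 k 1).foldl
    (fun sv i =>
      if time + i < 24 then
        PySem.List.pySetD sv (time + i) (PySem.List.pyGetD sv (time + i) 0 + required)
      else sv)
    server

-- for time, player in enumerate(players): … (time carried explicitly)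
def solLoopA (m k : Int) : List Int → Int → List Int → Int → Int
  | [], _, _, answer => answer
  | player :: ps, time, server, answer =>
    if player ≥ m then
      let required := PySem.Int.floordiv player m - PySem.List.pyGetD server time 0
      if required > 0 then
        solLoopA m k ps (time + 1) (solInnerA k time required server) (answer + required)
      else solLoopA m k ps (time + 1) server answer
    else solLoopA m k ps (time + 1) server answer

def solution (players : List Int) (m : Int) (k : Int) : Int :=
  solLoopA m k players 0 (List.replicate 24 0) 0

-- ===== PORT B =====
-- for time, player in enumerate(players): curr += delta[time]; …
def solLoopB (m k n : Int) : List Int → Int → List Int → Int → Int → Int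
  | [], _, _, _, answer => answer
  | player :: ps, time, delta, curr, answer =>
    let curr := curr + PySem.List.pyGetD delta time 0
    if player ≥ m then
      let required := PySem.Int.floordiv player m - curr
      if required > 0 then
        if k > 0 then
          let e := time + k
          let delta :=
            if e ≤ n then PySem.List.pySetD delta e (PySem.List.pyGetD delta e 0 - required)
            else delta
          solLoopB m k n ps (time + 1) delta (curr + required) (answer + required)
        else solLoopB m k n ps (time + 1) delta curr (answer + required)
      else solLoopB m k n ps (time + 1) delta curr answer
    else solLoopB m k n ps (time + 1) delta curr answer

def solution_alt (players : List Int) (m : Int) (k : Int) : Int :=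
  solLoopB m k players.length players 0 (List.replicate (players.length + 1) 0) 0 0

-- ===== PRECONDITION & SPEC =====
-- Pre_ excludes exactly the inputs where Python A raises: ZeroDivisionError when m = 0 and
-- some player ≥ 0, and IndexError when some player at an hour ≥ 24 satisfies player ≥ m.
def Pre_solution (players : List Int) (m : Int) (k : Int) : Prop :=
  (m = 0 → ∀ p ∈ players, p < 0) ∧ (∀ p ∈ players.drop 24, p < m)
instance (players : List Int) (m : Int) (k : Int) : Decidable (Pre_solution players m k) := by
  unfold Pre_solution; infer_instance

def pvWitness_solution : List Int × Int × Int := ([10, 3, 7], 2, 3)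

def Spec_solution (players : List Int) (m : Int) (k : Int) (out : Int) : Prop := out = solution_alt players m k
instance (players : List Int) (m : Int) (k : Int) (out : Int) : Decidable (Spec_solution players m k out) := by unfold Spec_solution; infer_instance

-- ===== CLAIM (what is proved, stated in full; the proofs are below) =====
def Claim_equal_solution : Prop := ∀ (players : List Int) (m : Int) (k : Int), Dom_solution players m k → Pre_solution players m k → Spec_solution players m k (solution players m k)

-- ===== LEMMAS AND PROOFS =====

-- sum of delta.getD over the index segment [lo, lo+len)
def segSum (d : List Int) : ℕ → ℕ → Int
  | _, 0 => 0
  | lo, len + 1 => d.getD lo 0 + segSum d (lo + 1) len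

theorem getD_set_self (d : List Int) (q : ℕ) (v : Int) (h : q < d.length) :
    (d.set q v).getD q 0 = v := by
  simp [List.getD, List.getElem?_set, h]

theorem getD_set_ne (d : List Int) (q j : ℕ) (v : Int) (h : q ≠ j) :
    (d.set q v).getD j 0 = d.getD j 0 := by
  simp [List.getD, List.getElem?_set, h]

theorem getD_replicate_zero (n i : ℕ) : (List.replicate n (0 : Int)).getD i 0 = 0 := by
  simp only [List.getD, List.getElem?_replicate]
  split <;> rfl

theorem segSum_zero_fun (d : List Int) (h : ∀ i, d.getD i 0 = 0) :
    ∀ len lo, segSum d lo len = 0 := by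
  intro len
  induction len with
  | zero => intro lo; rfl
  | succ n ih =>
    intro lo
    show d.getD lo 0 + segSum d (lo + 1) n = 0
    rw [h lo, ih]
    rfl

theorem segSum_set_out (d : List Int) (q : ℕ) (v : Int) :
    ∀ len lo, (q < lo ∨ lo + len ≤ q) → segSum (d.set q v) lo len = segSum d lo len := by
  intro len
  induction len with
  | zero => intro lo _; rfl
  | succ n ih =>
    intro lo hq
    have : (d.set q v).getD lo 0 = d.getD lo 0 := getD_set_ne d q lo v (by omega)
    simp only [segSum, this, ih (lo + 1) (by omega)]

theorem segSum_set_in (d : List Int) (q : ℕ) (v : Int) (hql : q < d.length) :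
    ∀ len lo, (lo ≤ q) → (q < lo + len) →
      segSum (d.set q v) lo len = segSum d lo len + v - d.getD q 0 := by
  intro len
  induction len with
  | zero => intro lo h1 h2; omega
  | succ n ih =>
    intro lo h1 h2
    by_cases hq : lo = q
    · subst hq
      have h3 : (d.set lo v).getD lo 0 = v := getD_set_self d lo v (by omega)
      simp only [segSum, h3, segSum_set_out d lo v n (lo + 1) (by omega)]
      ring
    · have h3 : (d.set q v).getD lo 0 = d.getD lo 0 := getD_set_ne d q lo v (Ne.symm hq)
      simp only [segSum, h3, ih (lo + 1) (by omega) (by omega)]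
      ring

theorem innerA_length (k time required : Int) (server : List Int) :
    (solInnerA k time required server).length = server.length := by
  unfold solInnerA
  generalize PySem.List.pyRange 0 k 1 = l
  induction l generalizing server with
  | nil => rfl
  | cons x xs ih =>
    simp only [List.foldl_cons]
    rw [ih]
    split
    · simp [PySem.List.length_pySetD]
    · rfl

theorem innerA_fold_getD (t : ℕ) (required k : Int) :
    ∀ (fuel a : ℕ) (server : List Int), (k - (a : Int)).toNat ≤ fuel → server.length = 24 →
      ∀ j : ℕ, j < 24 →
        ((PySem.List.pyRange (a : Int) k 1).foldl
          (fun sv i =>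
            if (t : Int) + i < 24 then
              PySem.List.pySetD sv ((t : Int) + i) (PySem.List.pyGetD sv ((t : Int) + i) 0 + required)
            else sv) server).getD j 0
        = server.getD j 0 + (if t + a ≤ j ∧ (j : Int) < (t : Int) + k then required else 0) := by
  intro fuel
  induction fuel with
  | zero =>
    intro a server hfuel hlen j hj
    have hka : k ≤ (a : Int) := by omega
    rw [PySem.List.pyRange_one_eq_nil hka]
    have : ¬ (t + a ≤ j ∧ (j : Int) < (t : Int) + k) := by
      rintro ⟨h1, h2⟩; omega
    simp [this]
  | succ fuel ih =>
    intro a server hfuel hlen j hj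
    by_cases hka : k ≤ (a : Int)
    · rw [PySem.List.pyRange_one_eq_nil hka]
      have : ¬ (t + a ≤ j ∧ (j : Int) < (t : Int) + k) := by
        rintro ⟨h1, h2⟩; omega
      simp [this]
    · push_neg at hka
      rw [PySem.List.pyRange_one_cons hka]
      simp only [List.foldl_cons]
      have hcast : (a : Int) + 1 = ((a + 1 : ℕ) : Int) := by push_cast; ring
      rw [hcast]
      by_cases h24 : (t : Int) + (a : Int) < 24
      · simp only [if_pos h24]
        have hidx : ((t : Int) + (a : Int)) = ((t + a : ℕ) : Int) := by push_cast; ring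
        have hset : PySem.List.pySetD server ((t : Int) + (a : Int))
              (PySem.List.pyGetD server ((t : Int) + (a : Int)) 0 + required)
            = server.set (t + a) (server.getD (t + a) 0 + required) := by
          rw [hidx, PySem.List.pySetD_natCast, PySem.List.pyGetD_natCast]
        rw [hset, ih (a + 1) _ (by omega) (by simp [hlen]) j hj]
        have hlt : t + a < server.length := by omega
        by_cases hj' : j = t + a
        · subst hj'
          rw [getD_set_self server (t + a) _ hlt]
          have c1 : ¬ (t + (a + 1) ≤ t + a ∧ ((t + a : ℕ) : Int) < (t : Int) + k) := by
            rintro ⟨x, _⟩; omega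
          have c2 : (t + a ≤ t + a ∧ ((t + a : ℕ) : Int) < (t : Int) + k) := by
            refine ⟨le_refl _, ?_⟩
            push_cast; omega
          rw [if_neg c1, if_pos c2]
          ring
        · rw [getD_set_ne server (t + a) j _ (fun h => hj' h.symm)]
          by_cases c3 : t + (a + 1) ≤ j ∧ (j : Int) < (t : Int) + k
          · rw [if_pos c3, if_pos (⟨by omega, c3.2⟩ : t + a ≤ j ∧ (j : Int) < (t : Int) + k)]
          · rw [if_neg c3, if_neg (fun h => c3 ⟨by omega, h.2⟩ :
              ¬ (t + a ≤ j ∧ (j : Int) < (t : Int) + k))]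
      · simp only [if_neg h24]
        rw [ih (a + 1) _ (by omega) hlen j hj]
        have hj24 : ((j : Int)) < 24 := by exact_mod_cast hj
        by_cases c3 : t + (a + 1) ≤ j ∧ (j : Int) < (t : Int) + k
        · have : ((t + (a + 1) : ℕ) : Int) ≤ (j : Int) := by exact_mod_cast c3.1
          push_cast at this
          omega
        · have c4 : ¬ (t + a ≤ j ∧ (j : Int) < (t : Int) + k) := by
            rintro ⟨h1', _⟩
            have : (t : Int) + a ≤ (j : Int) := by exact_mod_cast h1'
            omega
          rw [if_neg c3, if_neg c4]

theorem innerA_getD (t : ℕ) (k required : Int) (server : List Int)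
    (hlen : server.length = 24) (j : ℕ) (hj : j < 24) :
    (solInnerA k (t : Int) required server).getD j 0
      = server.getD j 0 + (if t ≤ j ∧ (j : Int) < (t : Int) + k then required else 0) := by
  have h := innerA_fold_getD t required k (k - 0).toNat 0 server (by simp) hlen j hj
  simpa [solInnerA] using h

-- main simulation invariant between A's loop and B's loop
theorem loop_eq (m k : Int) (n : ℕ) :
    ∀ (ps : List Int) (t : ℕ) (server delta : List Int) (curr answer : Int),
      server.length = 24 → delta.length = n + 1 → t + ps.length = n →
      (∀ i : ℕ, (hi : i < ps.length) → 24 ≤ t + i → ps[i] < m) →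
      (∀ j : ℕ, t ≤ j → j < n → j < 24 →
          server.getD j 0 = curr + segSum delta t (j + 1 - t)) →
      solLoopA m k ps (t : Int) server answer
        = solLoopB m k (n : Int) ps (t : Int) delta curr answer := by
  intro ps
  induction ps with
  | nil => intro t server delta curr answer _ _ _ _ _; rfl
  | cons p ps ih =>
    intro t server delta curr answer hls hld ht hPre hinv
    have htn : t < n := by simp at ht; omega
    have hdget : PySem.List.pyGetD delta (t : Int) 0 = delta.getD t 0 := by
      simp [PySem.List.pyGetD_natCast]
    -- the shifted invariant used when server is unchanged and curr absorbs delta[t]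
    have hinv_shift : ∀ j : ℕ, t + 1 ≤ j → j < n → j < 24 →
        server.getD j 0 = (curr + delta.getD t 0) + segSum delta (t + 1) (j + 1 - (t + 1)) := by
      intro j h1 h2 h3
      have := hinv j (by omega) h2 h3
      have hsplit : segSum delta t (j + 1 - t) = delta.getD t 0 + segSum delta (t + 1) (j - t) := by
        have : j + 1 - t = (j - t) + 1 := by omega
        rw [this]; rfl
      rw [this, hsplit]
      have : j + 1 - (t + 1) = j - t := by omega
      rw [this]; ring
    have hcast1 : (t : Int) + 1 = ((t + 1 : ℕ) : Int) := by push_cast; ring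
    by_cases hpm : p ≥ m
    · -- then t < 24, else hPre at i = 0 contradicts
      have ht24 : t < 24 := by
        by_contra h
        have := hPre 0 (by simp) (by omega)
        simp at this; omega
      have hread : server.getD t 0 = curr + delta.getD t 0 := by
        have := hinv t (le_refl t) htn ht24
        have h1 : t + 1 - t = 1 := by omega
        rw [h1] at this
        simpa [segSum] using this
      have hsget : PySem.List.pyGetD server (t : Int) 0 = server.getD t 0 := by
        simp [PySem.List.pyGetD_natCast]
      simp only [solLoopA, solLoopB, if_pos hpm, hdget, hsget, hread]
      set r := PySem.Int.floordiv p m - (curr + delta.getD t 0) with hr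
      by_cases hrpos : r > 0
      · simp only [if_pos hrpos]
        by_cases hk : k > 0
        · -- A scatters r over [t, t+k) ∩ [0,24); B schedules expiry at t+k
          simp only [if_pos hk]
          rw [hcast1]
          apply ih
          · rw [innerA_length, hls]
          · split <;> simp [PySem.List.length_pySetD, hld]
          · simp at ht ⊢; omega
          · intro i hi h24; exact hPre (i + 1) (by simpa using Nat.succ_lt_succ hi) (by omega)
          · intro j h1 h2 h3
            rw [innerA_getD t k r server hls j h3]
            have hkn : k.toNat = k := Int.toNat_of_nonneg (by omega)
            have hj' : j + 1 - (t + 1) = j - t := by omega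
            rw [hj']
            have hsh := hinv_shift j h1 h2 h3
            rw [hj'] at hsh
            by_cases he : (t : Int) + k ≤ (n : Int)
            · simp only [if_pos he]
              have hidx : (t : Int) + k = ((t + k.toNat : ℕ) : Int) := by push_cast; omega
              have hset : PySem.List.pySetD delta ((t : Int) + k)
                    (PySem.List.pyGetD delta ((t : Int) + k) 0 - r)
                  = delta.set (t + k.toNat) (delta.getD (t + k.toNat) 0 - r) := by
                rw [hidx, PySem.List.pySetD_natCast, PySem.List.pyGetD_natCast]
              rw [hset]
              have htk_le_n : t + k.toNat ≤ n := by omega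
              have hin : t + k.toNat < delta.length := by omega
              by_cases hjk : t + k.toNat ≤ j
              · -- expiry index lies inside the summed segment
                rw [segSum_set_in delta (t + k.toNat) _ hin (j - t) (t + 1) (by omega) (by omega)]
                have hcond : ¬ (t ≤ j ∧ (j : Int) < (t : Int) + k) := by
                  rintro ⟨_, hlt⟩; omega
                rw [if_neg hcond, hsh]
                ring
              · rw [segSum_set_out delta (t + k.toNat) _ (j - t) (t + 1) (by omega)]
                have hcond : (t ≤ j ∧ (j : Int) < (t : Int) + k) := ⟨by omega, by omega⟩
                rw [if_pos hcond, hsh]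
                ring
            · simp only [if_neg he]
              -- expiry beyond the schedule: the increment stays active for every j < n
              have hcond : (t ≤ j ∧ (j : Int) < (t : Int) + k) := ⟨by omega, by omega⟩
              rw [if_pos hcond, hsh]
              ring
        · -- k ≤ 0: A's inner range is empty, B never counts the increment
          simp only [if_neg hk]
          rw [hcast1]
          have hrange : PySem.List.pyRange 0 k 1 = [] :=
            PySem.List.pyRange_one_eq_nil (by omega)
          have hid : solInnerA k (t : Int) r server = server := by
            simp [solInnerA, hrange]
          rw [hid]
          apply ih
          · exact hls
          · exact hld
          · simp at ht ⊢; omega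
          · intro i hi h24; exact hPre (i + 1) (by simpa using Nat.succ_lt_succ hi) (by omega)
          · exact hinv_shift
      · simp only [if_neg hrpos]
        rw [hcast1]
        apply ih
        · exact hls
        · exact hld
        · simp at ht ⊢; omega
        · intro i hi h24; exact hPre (i + 1) (by simpa using Nat.succ_lt_succ hi) (by omega)
        · exact hinv_shift
    · simp only [solLoopA, solLoopB, if_neg hpm, hdget]
      rw [hcast1]
      apply ih
      · exact hls
      · exact hld
      · simp at ht ⊢; omega
      · intro i hi h24; exact hPre (i + 1) (by simpa using Nat.succ_lt_succ hi) (by omega)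
      · exact hinv_shift

-- ===== VERDICT (by name: the statement is the Claim_ definition above) =====
theorem solution_spec : Claim_equal_solution := by
  intro players m k _hdom hpre
  unfold Spec_solution solution solution_alt
  have h := loop_eq m k players.length players 0 (List.replicate 24 0)
      (List.replicate (players.length + 1) 0) 0 0 (by simp) (by simp) (by simp)
      (by
        intro i hi h24
        have h24' : 24 ≤ i := by omega
        have heq : players[i] = (players.drop 24)[i - 24]'(by simp; omega) := by
          rw [List.getElem_drop]
          congr 1
          omega
        rw [heq]
        exact hpre.2 _ (List.getElem_mem _))
      (by
        intro j _ _ _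
        rw [getD_replicate_zero, segSum_zero_fun _ (fun i => getD_replicate_zero _ i)]
        simp)
  simpa using h
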